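-- pv_equiv track=rewrite | github.com/andreazedda/bmyCure4MM | chemtools/pdb_api_client.py | _assess_mm_clinical_evidence
-- ===== SOURCE A (Python) =====
-- from typing import Dict, List, Optional, Any
--
-- def _assess_mm_clinical_evidence(drug_name: str, clinical_trials: List[Dict]) -> tuple:
--     """Score MM clinical evidence (0-35 points) and return status"""
--     score = 0
--     status = "No MM trials"
--     mm_trials = []
--
--     # Filter for MM-specific trials
--     for trial in clinical_trials:
--         title = trial.get('title', '').lower()
--         phase = trial.get('phase', '').upper()
--         trial_status = trial.get('status', '').lower()
--
--         # Check if trial is MM-related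
--         if any(keyword in title for keyword in [
--             'myeloma', 'multiple myeloma', 'mm ', 'plasma cell'
--         ]):
--             mm_trials.append({
--                 'phase': phase,
--                 'status': trial_status,
--                 'title': trial.get('title', '')
--             })
--
--     if mm_trials:
--         # Score based on trial phases and status
--         has_phase_4 = any('PHASE 4' in t['phase'] or 'PHASE4' in t['phase'] for t in mm_trials)
--         has_phase_3 = any('PHASE 3' in t['phase'] or 'PHASE3' in t['phase'] for t in mm_trials)
--         has_phase_2 = any('PHASE 2' in t['phase'] or 'PHASE2' in t['phase'] for t in mm_trials)
--         has_phase_1 = any('PHASE 1' in t['phase'] or 'PHASE1' in t['phase'] for t in mm_trials)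
--
--         active_trials = sum(1 for t in mm_trials if t['status'] in ['recruiting', 'active', 'enrolling'])
--         completed_trials = sum(1 for t in mm_trials if 'completed' in t['status'])
--
--         if has_phase_4 or completed_trials >= 3:
--             score = 35
--             status = f"FDA approved / {len(mm_trials)} MM trials"
--         elif has_phase_3:
--             score = 28
--             status = f"Phase III trials ({len(mm_trials)} MM trials)"
--         elif has_phase_2:
--             score = 20
--             status = f"Phase II trials ({len(mm_trials)} MM trials)"
--         elif has_phase_1:
--             score = 12
--             status = f"Phase I trials ({len(mm_trials)} MM trials)"
--         else:
--             score = 8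
--             status = f"{len(mm_trials)} MM trials (phase unclear)"
--
--         # Bonus for active trials
--         if active_trials > 0:
--             score += min(5, active_trials)
--             status += f", {active_trials} active"
--
--     return score, status
-- ===== SOURCE B (Python) =====
-- def _assess_mm_clinical_evidence(drug_name, clinical_trials):
--     """Single-pass scoring of MM clinical evidence (0-35 points) and status."""
--     mm_count = 0
--     has_p1 = has_p2 = has_p3 = has_p4 = False
--     active = 0
--     completed = 0
--     for trial in clinical_trials:
--         title = trial.get('title', '').lower()
--         if 'myeloma' in title or 'mm ' in title or 'plasma cell' in title:
--             mm_count += 1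
--             phase = trial.get('phase', '').upper()
--             has_p4 = has_p4 or 'PHASE 4' in phase or 'PHASE4' in phase
--             has_p3 = has_p3 or 'PHASE 3' in phase or 'PHASE3' in phase
--             has_p2 = has_p2 or 'PHASE 2' in phase or 'PHASE2' in phase
--             has_p1 = has_p1 or 'PHASE 1' in phase or 'PHASE1' in phase
--             st = trial.get('status', '').lower()
--             if st in ('recruiting', 'active', 'enrolling'):
--                 active += 1
--             if 'completed' in st:
--                 completed += 1
--     if mm_count == 0:
--         return 0, "No MM trials"
--     if has_p4 or completed >= 3:
--         score, status = 35, f"FDA approved / {mm_count} MM trials"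
--     elif has_p3:
--         score, status = 28, f"Phase III trials ({mm_count} MM trials)"
--     elif has_p2:
--         score, status = 20, f"Phase II trials ({mm_count} MM trials)"
--     elif has_p1:
--         score, status = 12, f"Phase I trials ({mm_count} MM trials)"
--     else:
--         score, status = 8, f"{mm_count} MM trials (phase unclear)"
--     if active > 0:
--         score += min(5, active)
--         status += f", {active} active"
--     return score, status
-- ===== Notes on version B (the rewrite author's own statement) =====
-- stated objective: simpler
-- what changed: Replaces A's two-phase structure (build an intermediate mm_trials list of dicts, then five separate any/sum scans over it) with a single loop over clinical_trials maintaining scalar accumulators (mm_count, four phase flags, active/completed counters), and drops the redundant 'multiple myeloma' keyword (subsumed by 'myeloma').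
import Mathlib
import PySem

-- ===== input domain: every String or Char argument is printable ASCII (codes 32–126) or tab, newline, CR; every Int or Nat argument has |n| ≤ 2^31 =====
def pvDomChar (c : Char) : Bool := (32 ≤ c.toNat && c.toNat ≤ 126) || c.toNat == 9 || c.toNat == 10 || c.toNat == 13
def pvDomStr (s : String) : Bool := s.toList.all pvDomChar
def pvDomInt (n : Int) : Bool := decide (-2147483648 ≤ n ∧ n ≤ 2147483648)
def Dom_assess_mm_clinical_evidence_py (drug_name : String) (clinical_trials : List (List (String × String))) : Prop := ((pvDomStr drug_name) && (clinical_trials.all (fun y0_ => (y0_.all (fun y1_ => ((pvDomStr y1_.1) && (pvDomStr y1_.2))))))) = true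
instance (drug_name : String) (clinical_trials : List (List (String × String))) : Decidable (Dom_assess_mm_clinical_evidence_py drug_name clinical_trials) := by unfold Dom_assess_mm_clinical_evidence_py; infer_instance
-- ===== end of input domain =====

-- B fuses A's two phases (filter into mm_trials, then several scans over it) into one pass
-- keeping scalar accumulators; objective: simpler (no intermediate list, one loop).

-- ===== PORT A =====
-- the body of A's filtering loop: append the (phase, status, title)-record when the title is MM-related
def pvStepA (mm_trials : List (String × String × String)) (trial : List (String × String)) :
    List (String × String × String) :=
  let title := PySem.Str.lower ((PySem.Dict.mk trial).getD "title" "")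
  let phase := PySem.Str.upper ((PySem.Dict.mk trial).getD "phase" "")
  let trial_status := PySem.Str.lower ((PySem.Dict.mk trial).getD "status" "")
  if ["myeloma", "multiple myeloma", "mm ", "plasma cell"].any (fun k => PySem.Str.isIn k title) then
    mm_trials ++ [(phase, trial_status, (PySem.Dict.mk trial).getD "title" "")]
  else
    mm_trials

def assess_mm_clinical_evidence_py (drug_name : String) (clinical_trials : List (List (String × String))) : Int × String :=
  let score : Int := 0
  let status : String := "No MM trials"
  let mm_trials := clinical_trials.foldl pvStepA []
  if mm_trials = [] then (score, status)
  else
    let has_phase_4 := mm_trials.any (fun t => PySem.Str.isIn "PHASE 4" t.1 || PySem.Str.isIn "PHASE4" t.1)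
    let has_phase_3 := mm_trials.any (fun t => PySem.Str.isIn "PHASE 3" t.1 || PySem.Str.isIn "PHASE3" t.1)
    let has_phase_2 := mm_trials.any (fun t => PySem.Str.isIn "PHASE 2" t.1 || PySem.Str.isIn "PHASE2" t.1)
    let has_phase_1 := mm_trials.any (fun t => PySem.Str.isIn "PHASE 1" t.1 || PySem.Str.isIn "PHASE1" t.1)
    let active_trials : Int := mm_trials.foldl
      (fun acc t => if t.2.1 ∈ ["recruiting", "active", "enrolling"] then acc + 1 else acc) 0
    let completed_trials : Int := mm_trials.foldl
      (fun acc t => if PySem.Str.isIn "completed" t.2.1 then acc + 1 else acc) 0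
    let n := PySem.Int.toStr (mm_trials.length : Int)
    let (score, status) :=
      if has_phase_4 || completed_trials ≥ 3 then
        ((35 : Int), "FDA approved / " ++ n ++ " MM trials")
      else if has_phase_3 then ((28 : Int), "Phase III trials (" ++ n ++ " MM trials)")
      else if has_phase_2 then ((20 : Int), "Phase II trials (" ++ n ++ " MM trials)")
      else if has_phase_1 then ((12 : Int), "Phase I trials (" ++ n ++ " MM trials)")
      else ((8 : Int), n ++ " MM trials (phase unclear)")
    if active_trials > 0 then
      (score + min 5 active_trials, status ++ ", " ++ PySem.Int.toStr active_trials ++ " active")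
    else (score, status)

-- ===== PORT B =====
-- B's loop state: (mm_count, has_p1, has_p2, has_p3, has_p4, active, completed)
def pvStepB (s : Int × Bool × Bool × Bool × Bool × Int × Int) (trial : List (String × String)) :
    Int × Bool × Bool × Bool × Bool × Int × Int :=
  let title := PySem.Str.lower ((PySem.Dict.mk trial).getD "title" "")
  if PySem.Str.isIn "myeloma" title || PySem.Str.isIn "mm " title || PySem.Str.isIn "plasma cell" title then
    let phase := PySem.Str.upper ((PySem.Dict.mk trial).getD "phase" "")
    let st := PySem.Str.lower ((PySem.Dict.mk trial).getD "status" "")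
    (s.1 + 1,
     s.2.1 || PySem.Str.isIn "PHASE 1" phase || PySem.Str.isIn "PHASE1" phase,
     s.2.2.1 || PySem.Str.isIn "PHASE 2" phase || PySem.Str.isIn "PHASE2" phase,
     s.2.2.2.1 || PySem.Str.isIn "PHASE 3" phase || PySem.Str.isIn "PHASE3" phase,
     s.2.2.2.2.1 || PySem.Str.isIn "PHASE 4" phase || PySem.Str.isIn "PHASE4" phase,
     s.2.2.2.2.2.1 + (if st ∈ ["recruiting", "active", "enrolling"] then 1 else 0),
     s.2.2.2.2.2.2 + (if PySem.Str.isIn "completed" st then 1 else 0))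
  else s

def assess_mm_clinical_evidence_py_alt (drug_name : String) (clinical_trials : List (List (String × String))) : Int × String :=
  let s := clinical_trials.foldl pvStepB (0, false, false, false, false, 0, 0)
  let mm_count := s.1
  let has_p1 := s.2.1
  let has_p2 := s.2.2.1
  let has_p3 := s.2.2.2.1
  let has_p4 := s.2.2.2.2.1
  let active := s.2.2.2.2.2.1
  let completed := s.2.2.2.2.2.2
  if mm_count = 0 then (0, "No MM trials")
  else
    let nstr := PySem.Int.toStr mm_count
    let (score, status) :=
      if has_p4 || completed ≥ 3 then ((35 : Int), "FDA approved / " ++ nstr ++ " MM trials")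
      else if has_p3 then ((28 : Int), "Phase III trials (" ++ nstr ++ " MM trials)")
      else if has_p2 then ((20 : Int), "Phase II trials (" ++ nstr ++ " MM trials)")
      else if has_p1 then ((12 : Int), "Phase I trials (" ++ nstr ++ " MM trials)")
      else ((8 : Int), nstr ++ " MM trials (phase unclear)")
    if active > 0 then
      (score + min 5 active, status ++ ", " ++ PySem.Int.toStr active ++ " active")
    else (score, status)

-- ===== PRECONDITION & SPEC =====
def Spec_assess_mm_clinical_evidence_py (drug_name : String) (clinical_trials : List (List (String × String))) (out : Int × String) : Prop := out = assess_mm_clinical_evidence_py_alt drug_name clinical_trials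
instance (drug_name : String) (clinical_trials : List (List (String × String))) (out : Int × String) : Decidable (Spec_assess_mm_clinical_evidence_py drug_name clinical_trials out) := by unfold Spec_assess_mm_clinical_evidence_py; infer_instance

-- ===== CLAIM (what is proved, stated in full; the proofs are below) =====
def Claim_equal_assess_mm_clinical_evidence_py : Prop := ∀ (drug_name : String) (clinical_trials : List (List (String × String))), Dom_assess_mm_clinical_evidence_py drug_name clinical_trials → Spec_assess_mm_clinical_evidence_py drug_name clinical_trials (assess_mm_clinical_evidence_py drug_name clinical_trials)

-- ===== LEMMAS AND PROOFS =====

-- the scalar statistics B maintains, read off A's filtered list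
def pvStats (l : List (String × String × String)) : Int × Bool × Bool × Bool × Bool × Int × Int :=
  ((l.length : Int),
   l.any (fun t => PySem.Str.isIn "PHASE 1" t.1 || PySem.Str.isIn "PHASE1" t.1),
   l.any (fun t => PySem.Str.isIn "PHASE 2" t.1 || PySem.Str.isIn "PHASE2" t.1),
   l.any (fun t => PySem.Str.isIn "PHASE 3" t.1 || PySem.Str.isIn "PHASE3" t.1),
   l.any (fun t => PySem.Str.isIn "PHASE 4" t.1 || PySem.Str.isIn "PHASE4" t.1),
   (l.countP (fun t => t.2.1 ∈ ["recruiting", "active", "enrolling"]) : Int),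
   (l.countP (fun t => PySem.Str.isIn "completed" t.2.1) : Int))

theorem pv_myeloma_absorb (s : String) :
    PySem.Str.isIn "multiple myeloma" s = true → PySem.Str.isIn "myeloma" s = true := by
  intro h
  rw [PySem.Str.isIn_iff_infix] at h ⊢
  exact List.IsInfix.trans (by decide) h

theorem pv_cond_eq (title : String) :
    (["myeloma", "multiple myeloma", "mm ", "plasma cell"].any (fun k => PySem.Str.isIn k title))
      = (PySem.Str.isIn "myeloma" title || PySem.Str.isIn "mm " title || PySem.Str.isIn "plasma cell" title) := by
  simp only [List.any_cons, List.any_nil, Bool.or_false]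
  cases hm : PySem.Str.isIn "myeloma" title with
  | true => simp only [Bool.true_or]
  | false =>
    cases hmm : PySem.Str.isIn "multiple myeloma" title with
    | true => rw [pv_myeloma_absorb title hmm] at hm; exact Bool.noConfusion hm
    | false => simp only [Bool.false_or]

theorem pv_step_eq (acc : List (String × String × String)) (trial : List (String × String)) :
    pvStepB (pvStats acc) trial = pvStats (pvStepA acc trial) := by
  simp only [pvStepA, pvStepB, pv_cond_eq]
  by_cases hc : (PySem.Str.isIn "myeloma" (PySem.Str.lower ((PySem.Dict.mk trial).getD "title" ""))
      || PySem.Str.isIn "mm " (PySem.Str.lower ((PySem.Dict.mk trial).getD "title" ""))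
      || PySem.Str.isIn "plasma cell" (PySem.Str.lower ((PySem.Dict.mk trial).getD "title" ""))) = true
  · simp only [hc, if_true, pvStats, List.length_append, List.any_append, List.countP_append,
      List.any_cons, List.any_nil, List.countP_cons, List.countP_nil, List.length_cons,
      List.length_nil, Bool.or_false]
    push_cast [Bool.or_assoc]
    simp only [Prod.mk.injEq]
    refine ⟨trivial, trivial, trivial, trivial, trivial, ?_, ?_⟩ <;> simp
  · rw [if_neg hc, if_neg hc]

theorem pv_loop_eq (cts : List (List (String × String))) (acc : List (String × String × String)) :
    cts.foldl pvStepB (pvStats acc) = pvStats (cts.foldl pvStepA acc) := by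
  induction cts generalizing acc with
  | nil => rfl
  | cons t ts ih =>
    simp only [List.foldl_cons, pv_step_eq, ih]

theorem pv_active_count (l : List (String × String × String)) :
    l.foldl (fun acc t => if t.2.1 ∈ ["recruiting", "active", "enrolling"] then acc + 1 else acc) (0 : Int)
      = (l.countP (fun t => t.2.1 ∈ ["recruiting", "active", "enrolling"]) : Int) := by
  rw [PySem.List.foldl_ite_add_one]; simp

theorem pv_completed_count (l : List (String × String × String)) :
    l.foldl (fun acc t => if PySem.Str.isIn "completed" t.2.1 then acc + 1 else acc) (0 : Int)
      = (l.countP (fun t => PySem.Str.isIn "completed" t.2.1) : Int) := by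
  rw [PySem.List.foldl_ite_add_one]; simp

-- ===== VERDICT (by name: the statement is the Claim_ definition above) =====
theorem assess_mm_clinical_evidence_py_spec : Claim_equal_assess_mm_clinical_evidence_py := by
  intro drug_name clinical_trials _
  unfold Spec_assess_mm_clinical_evidence_py
  unfold assess_mm_clinical_evidence_py assess_mm_clinical_evidence_py_alt
  have h0 : (0, false, false, false, false, (0 : Int), (0 : Int)) = pvStats [] := rfl
  rw [h0, pv_loop_eq]
  set l := clinical_trials.foldl pvStepA [] with hl
  by_cases he : l = []
  · simp [he, pvStats]
  · have hne : ((l.length : Int)) ≠ 0 := by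
      simp [List.length_eq_zero_iff, he]
    simp only [pvStats, if_neg he, if_neg hne, pv_active_count, pv_completed_count]
    rfl
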